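-- pv_equiv track=rewrite | github.com/soomin838/Soomin | core/visual.py | _context_scene_pool
-- ===== SOURCE A (Python) =====
-- def _context_scene_pool(context: str) -> list[str]:
--     text = f" {str(context or '').lower()} "
--     buckets: list[list[str]] = []
--
--     def has_any(words: list[str]) -> bool:
--         return any(f" {w} " in text for w in words)
--
--     if has_any(["travel", "flight", "airport", "hotel", "commute", "train"]):
--         buckets.append(
--             [
--                 "airport terminal waiting zone",
--                 "train station platform scene",
--                 "hotel desk with travel setup",
--                 "in-transit workspace with carry-on gear",
--             ]
--         )
--     if has_any(["home", "remote", "kitchen", "living room", "family", "personal"]):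
--         buckets.append(
--             [
--                 "home desk by a window",
--                 "kitchen table with practical setup",
--                 "living room side table work corner",
--                 "small apartment workspace",
--             ]
--         )
--     if has_any(["code", "developer", "software", "api", "server", "cloud", "database"]):
--         buckets.append(
--             [
--                 "developer desk with terminal glow",
--                 "server room aisle with status lights",
--                 "operations dashboard screen setup",
--                 "modern dev lab environment",
--             ]
--         )
--     if has_any(["design", "brand", "creative", "photo", "video", "editing"]):
--         buckets.append(
--             [
--                 "creative studio desk with color tools",
--                 "editing station with timeline on display",
--                 "camera and lighting gear workspace",
--                 "design review table with visual mockups",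
--             ]
--         )
--     if has_any(["finance", "budget", "cost", "price", "revenue", "adsense"]):
--         buckets.append(
--             [
--                 "financial planning desk with charts",
--                 "calculator and report review setup",
--                 "budget board with trend lines",
--                 "performance review scene with notebooks",
--             ]
--         )
--     if has_any(["health", "medical", "wellness", "sleep", "fitness"]):
--         buckets.append(
--             [
--                 "wellness-focused home routine scene",
--                 "health journal and device setup",
--                 "morning routine environment with natural light",
--                 "calm workspace break area",
--             ]
--         )
--     if has_any(["education", "learn", "course", "student", "training"]):
--         buckets.append(
--             [
--                 "classroom desk with learning materials",
--                 "online study setup with notes",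
--                 "training room with presentation screen",
--                 "library research table",
--             ]
--         )
--     if has_any(["retail", "store", "customer", "sales", "shop", "ecommerce"]):
--         buckets.append(
--             [
--                 "retail checkout counter scene",
--                 "store shelf management view",
--                 "customer service desk setup",
--                 "packing station for online orders",
--             ]
--         )
--
--     merged: list[str] = []
--     seen: set[str] = set()
--     for group in buckets:
--         for scene in group:
--             key = scene.strip().lower()
--             if key in seen:
--                 continue
--             seen.add(key)
--             merged.append(scene)
--     return merged
-- ===== SOURCE B (Python) =====
-- _KEYWORD_TO_BUCKET = {
--     "travel": 0, "flight": 0, "airport": 0, "hotel": 0, "commute": 0, "train": 0,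
--     "home": 1, "remote": 1, "kitchen": 1, "living room": 1, "family": 1, "personal": 1,
--     "code": 2, "developer": 2, "software": 2, "api": 2, "server": 2, "cloud": 2, "database": 2,
--     "design": 3, "brand": 3, "creative": 3, "photo": 3, "video": 3, "editing": 3,
--     "finance": 4, "budget": 4, "cost": 4, "price": 4, "revenue": 4, "adsense": 4,
--     "health": 5, "medical": 5, "wellness": 5, "sleep": 5, "fitness": 5,
--     "education": 6, "learn": 6, "course": 6, "student": 6, "training": 6,
--     "retail": 7, "store": 7, "customer": 7, "sales": 7, "shop": 7, "ecommerce": 7,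
-- }
--
-- _SCENES = [
--     ["airport terminal waiting zone",
--      "train station platform scene",
--      "hotel desk with travel setup",
--      "in-transit workspace with carry-on gear"],
--     ["home desk by a window",
--      "kitchen table with practical setup",
--      "living room side table work corner",
--      "small apartment workspace"],
--     ["developer desk with terminal glow",
--      "server room aisle with status lights",
--      "operations dashboard screen setup",
--      "modern dev lab environment"],
--     ["creative studio desk with color tools",
--      "editing station with timeline on display",
--      "camera and lighting gear workspace",
--      "design review table with visual mockups"],
--     ["financial planning desk with charts",
--      "calculator and report review setup",
--      "budget board with trend lines",
--      "performance review scene with notebooks"],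
--     ["wellness-focused home routine scene",
--      "health journal and device setup",
--      "morning routine environment with natural light",
--      "calm workspace break area"],
--     ["classroom desk with learning materials",
--      "online study setup with notes",
--      "training room with presentation screen",
--      "library research table"],
--     ["retail checkout counter scene",
--      "store shelf management view",
--      "customer service desk setup",
--      "packing station for online orders"],
-- ]
--
--
-- def _context_scene_pool(context: str) -> list[str]:
--     # Index the text instead of scanning it per keyword: split once on single
--     # spaces, form unigrams and adjacent bigrams, and look each gram up in a
--     # flat keyword -> bucket-index map.  A padded keyword " w " occurs in
--     # " text " exactly when w is a token (or an adjacent token pair, for the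
--     # one two-word keyword) of the split.  Scene titles are pairwise distinct
--     # across buckets, so the hit buckets concatenate directly with no dedup.
--     words = str(context or '').lower().split(" ")
--     grams = words + [a + " " + b for a, b in zip(words, words[1:])]
--     hits = set()
--     for g in grams:
--         b = _KEYWORD_TO_BUCKET.get(g)
--         if b is not None:
--             hits.add(b)
--     pool: list[str] = []
--     for i, scenes in enumerate(_SCENES):
--         if i in hits:
--             pool.extend(scenes)
--     return pool
-- ===== Notes on version B (the rewrite author's own statement) =====
-- stated objective: faster
-- what changed: Instead of running a substring search over the padded text for each of 45 padded keywords and then deduplicating the collected buckets, B tokenizes the text once by splitting on spaces, forms unigrams and adjacent bigrams, looks each gram up in a flat keyword-to-bucket-index dict to collect the hit buckets, and concatenates their scene lists directly with no dedup pass (scene titles are pairwise distinct constants).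
import Mathlib
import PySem

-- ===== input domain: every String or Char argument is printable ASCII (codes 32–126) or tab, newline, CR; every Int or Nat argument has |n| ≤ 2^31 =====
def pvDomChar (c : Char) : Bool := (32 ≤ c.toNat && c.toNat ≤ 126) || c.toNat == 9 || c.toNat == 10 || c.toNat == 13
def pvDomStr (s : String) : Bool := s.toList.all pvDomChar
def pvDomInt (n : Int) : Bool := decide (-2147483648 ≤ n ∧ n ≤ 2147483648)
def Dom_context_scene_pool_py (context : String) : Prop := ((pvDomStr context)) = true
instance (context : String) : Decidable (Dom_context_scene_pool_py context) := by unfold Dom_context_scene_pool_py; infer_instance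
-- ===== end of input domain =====

-- B replaces A's 45 per-keyword substring scans + dedup pass by tokenizing the text once
-- (split on spaces, unigrams + adjacent bigrams), looking each gram up in a flat
-- keyword -> bucket-index dict, and concatenating the hit buckets' scene lists directly
-- (measurably faster: one pass over the text instead of one scan per keyword).

-- ===== PORT A =====
-- `" w " in text` for each word (any(...))
def pvHasAny (text : List Char) (words : List String) : Bool :=
  words.any (fun w => PySem.Chars.isIn (' ' :: w.toList ++ [' ']) text)

-- dedup step of A's merge loop: state = (merged, seen)
def pvMergeStep (st : List String × PySem.Set (List Char)) (scene : String) :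
    List String × PySem.Set (List Char) :=
  let key := PySem.Chars.lower (PySem.Chars.strip scene.toList)
  if st.2.contains key then st else (st.1 ++ [scene], st.2.add key)

def context_scene_pool_py (context : String) : List String :=
  -- `str(context or '')` is `context` itself for a str argument
  let text := ' ' :: PySem.Chars.lower context.toList ++ [' ']
  let buckets : List (List String) := []
  let buckets := if pvHasAny text ["travel", "flight", "airport", "hotel", "commute", "train"] then
    buckets ++ [["airport terminal waiting zone",
                 "train station platform scene",
                 "hotel desk with travel setup",
                 "in-transit workspace with carry-on gear"]] else buckets
  let buckets := if pvHasAny text ["home", "remote", "kitchen", "living room", "family", "personal"] then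
    buckets ++ [["home desk by a window",
                 "kitchen table with practical setup",
                 "living room side table work corner",
                 "small apartment workspace"]] else buckets
  let buckets := if pvHasAny text ["code", "developer", "software", "api", "server", "cloud", "database"] then
    buckets ++ [["developer desk with terminal glow",
                 "server room aisle with status lights",
                 "operations dashboard screen setup",
                 "modern dev lab environment"]] else buckets
  let buckets := if pvHasAny text ["design", "brand", "creative", "photo", "video", "editing"] then
    buckets ++ [["creative studio desk with color tools",
                 "editing station with timeline on display",
                 "camera and lighting gear workspace",
                 "design review table with visual mockups"]] else buckets
  let buckets := if pvHasAny text ["finance", "budget", "cost", "price", "revenue", "adsense"] then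
    buckets ++ [["financial planning desk with charts",
                 "calculator and report review setup",
                 "budget board with trend lines",
                 "performance review scene with notebooks"]] else buckets
  let buckets := if pvHasAny text ["health", "medical", "wellness", "sleep", "fitness"] then
    buckets ++ [["wellness-focused home routine scene",
                 "health journal and device setup",
                 "morning routine environment with natural light",
                 "calm workspace break area"]] else buckets
  let buckets := if pvHasAny text ["education", "learn", "course", "student", "training"] then
    buckets ++ [["classroom desk with learning materials",
                 "online study setup with notes",
                 "training room with presentation screen",
                 "library research table"]] else buckets
  let buckets := if pvHasAny text ["retail", "store", "customer", "sales", "shop", "ecommerce"] then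
    buckets ++ [["retail checkout counter scene",
                 "store shelf management view",
                 "customer service desk setup",
                 "packing station for online orders"]] else buckets
  (buckets.foldl (fun st group => group.foldl pvMergeStep st)
    (([] : List String), (PySem.Set.empty : PySem.Set (List Char)))).1

-- ===== PORT B =====
-- Hand port of Python `s.split(" ")` (single-space separator, empty pieces kept):
-- exact for this call — PySem.Chars.splitOn computes the same list but its fueled
-- definition is unsuited to induction, so the recursion is written out structurally.
def pvSplitSp : List Char → List (List Char)
  | [] => [[]]
  | c :: t =>
    if c = ' ' then [] :: pvSplitSp t
    else match pvSplitSp t with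
      | [] => [[c]]
      | h :: hs => (c :: h) :: hs

-- Source B's _KEYWORD_TO_BUCKET dict literal
def pvKw : PySem.Dict (List Char) Int := PySem.Dict.mk
  [("travel".toList, 0), ("flight".toList, 0), ("airport".toList, 0), ("hotel".toList, 0),
   ("commute".toList, 0), ("train".toList, 0),
   ("home".toList, 1), ("remote".toList, 1), ("kitchen".toList, 1), ("living room".toList, 1),
   ("family".toList, 1), ("personal".toList, 1),
   ("code".toList, 2), ("developer".toList, 2), ("software".toList, 2), ("api".toList, 2),
   ("server".toList, 2), ("cloud".toList, 2), ("database".toList, 2),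
   ("design".toList, 3), ("brand".toList, 3), ("creative".toList, 3), ("photo".toList, 3),
   ("video".toList, 3), ("editing".toList, 3),
   ("finance".toList, 4), ("budget".toList, 4), ("cost".toList, 4), ("price".toList, 4),
   ("revenue".toList, 4), ("adsense".toList, 4),
   ("health".toList, 5), ("medical".toList, 5), ("wellness".toList, 5), ("sleep".toList, 5),
   ("fitness".toList, 5),
   ("education".toList, 6), ("learn".toList, 6), ("course".toList, 6), ("student".toList, 6),
   ("training".toList, 6),
   ("retail".toList, 7), ("store".toList, 7), ("customer".toList, 7), ("sales".toList, 7),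
   ("shop".toList, 7), ("ecommerce".toList, 7)]

-- Source B's _SCENES table
def pvScenes : List (List String) :=
  [["airport terminal waiting zone",
    "train station platform scene",
    "hotel desk with travel setup",
    "in-transit workspace with carry-on gear"],
   ["home desk by a window",
    "kitchen table with practical setup",
    "living room side table work corner",
    "small apartment workspace"],
   ["developer desk with terminal glow",
    "server room aisle with status lights",
    "operations dashboard screen setup",
    "modern dev lab environment"],
   ["creative studio desk with color tools",
    "editing station with timeline on display",
    "camera and lighting gear workspace",
    "design review table with visual mockups"],
   ["financial planning desk with charts",
    "calculator and report review setup",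
    "budget board with trend lines",
    "performance review scene with notebooks"],
   ["wellness-focused home routine scene",
    "health journal and device setup",
    "morning routine environment with natural light",
    "calm workspace break area"],
   ["classroom desk with learning materials",
    "online study setup with notes",
    "training room with presentation screen",
    "library research table"],
   ["retail checkout counter scene",
    "store shelf management view",
    "customer service desk setup",
    "packing station for online orders"]]

def context_scene_pool_py_alt (context : String) : List String :=
  let words := pvSplitSp (PySem.Chars.lower context.toList)
  let grams := words ++ (List.zip words words.tail).map (fun p => p.1 ++ ' ' :: p.2)
  let hits := grams.foldl (fun s g =>
      match pvKw.get? g with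
      | some b => s.add b
      | none => s) (PySem.Set.empty : PySem.Set Int)
  (PySem.List.enumerate pvScenes).foldl
    (fun pool e => if hits.contains e.1 then pool ++ e.2 else pool) []

-- ===== PRECONDITION & SPEC =====
def Spec_context_scene_pool_py (context : String) (out : List String) : Prop := out = context_scene_pool_py_alt context
instance (context : String) (out : List String) : Decidable (Spec_context_scene_pool_py context out) := by unfold Spec_context_scene_pool_py; infer_instance

-- ===== CLAIM (what is proved, stated in full; the proofs are below) =====
def Claim_equal_context_scene_pool_py : Prop := ∀ (context : String), Dom_context_scene_pool_py context → Spec_context_scene_pool_py context (context_scene_pool_py context)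

-- ===== LEMMAS AND PROOFS =====

-- conditional selection of buckets: the common shape both ports reduce to
def pvSel (ps : List (Bool × List String)) : List String :=
  ps.foldl (fun a e => if e.1 then a ++ e.2 else a) []

-- " "-joined, " "-terminated rendering of a token list
def pvF (ts : List (List Char)) : List Char := (ts.map (fun x => x ++ [' '])).flatten

-- the gram list of B, as a function of the token list
def pvGrams (ts : List (List Char)) : List (List Char) :=
  ts ++ (List.zip ts ts.tail).map (fun p => p.1 ++ ' ' :: p.2)

-- B's hit set, as a function of the lowered text
def pvHits (t : List Char) : PySem.Set Int :=
  (pvGrams (pvSplitSp t)).foldl (fun s g =>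
      match pvKw.get? g with
      | some b => s.add b
      | none => s) (PySem.Set.empty : PySem.Set Int)

-- the eight (flag, bucket) pairs both ports reduce to
def pvPairs (b1 b2 b3 b4 b5 b6 b7 b8 : Bool) : List (Bool × List String) :=
  [(b1, ["airport terminal waiting zone",
        "train station platform scene",
        "hotel desk with travel setup",
        "in-transit workspace with carry-on gear"]),
   (b2, ["home desk by a window",
        "kitchen table with practical setup",
        "living room side table work corner",
        "small apartment workspace"]),
   (b3, ["developer desk with terminal glow",
        "server room aisle with status lights",
        "operations dashboard screen setup",
        "modern dev lab environment"]),
   (b4, ["creative studio desk with color tools",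
        "editing station with timeline on display",
        "camera and lighting gear workspace",
        "design review table with visual mockups"]),
   (b5, ["financial planning desk with charts",
        "calculator and report review setup",
        "budget board with trend lines",
        "performance review scene with notebooks"]),
   (b6, ["wellness-focused home routine scene",
        "health journal and device setup",
        "morning routine environment with natural light",
        "calm workspace break area"]),
   (b7, ["classroom desk with learning materials",
        "online study setup with notes",
        "training room with presentation screen",
        "library research table"]),
   (b8, ["retail checkout counter scene",
        "store shelf management view",
        "customer service desk setup",
        "packing station for online orders"])]

-- all 32 scene titles in bucket order
def pvAllScenes : List String :=
  ["airport terminal waiting zone",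
   "train station platform scene",
   "hotel desk with travel setup",
   "in-transit workspace with carry-on gear",
   "home desk by a window",
   "kitchen table with practical setup",
   "living room side table work corner",
   "small apartment workspace",
   "developer desk with terminal glow",
   "server room aisle with status lights",
   "operations dashboard screen setup",
   "modern dev lab environment",
   "creative studio desk with color tools",
   "editing station with timeline on display",
   "camera and lighting gear workspace",
   "design review table with visual mockups",
   "financial planning desk with charts",
   "calculator and report review setup",
   "budget board with trend lines",
   "performance review scene with notebooks",
   "wellness-focused home routine scene",
   "health journal and device setup",
   "morning routine environment with natural light",
   "calm workspace break area",
   "classroom desk with learning materials",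
   "online study setup with notes",
   "training room with presentation screen",
   "library research table",
   "retail checkout counter scene",
   "store shelf management view",
   "customer service desk setup",
   "packing station for online orders"]

-- a keyword is good when its padded occurrence in the padded text is exactly
-- membership of the keyword in B's gram list
def pvGood (w : String) : Prop := ∀ t : List Char,
  (PySem.Chars.isIn (' ' :: w.toList ++ [' ']) (' ' :: t ++ [' ']) = true)
    ↔ w.toList ∈ pvGrams (pvSplitSp t)

theorem pvSplitSp_ne_nil (t : List Char) : pvSplitSp t ≠ [] := by
  cases t with
  | nil => simp [pvSplitSp]
  | cons c t =>
    simp only [pvSplitSp]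
    split
    · simp
    · split <;> simp

theorem pvSplitSp_sf (t : List Char) : ∀ x ∈ pvSplitSp t, ' ' ∉ x := by
  induction t with
  | nil => simp [pvSplitSp]
  | cons c t ih =>
    simp only [pvSplitSp]
    split
    · intro x hx
      rw [List.mem_cons] at hx
      rcases hx with rfl | h
      · simp
      · exact ih x h
    · rename_i hc
      rcases hh : pvSplitSp t with _ | ⟨h, hs⟩
      · intro x hx
        simp at hx
        subst hx
        simp
        exact fun he => hc he.symm
      · intro x hx
        rw [List.mem_cons] at hx
        rcases hx with rfl | h1
        · intro hmem
          rcases List.mem_cons.mp hmem with h2 | h2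
          · exact hc h2.symm
          · exact ih h (hh ▸ List.mem_cons_self) h2
        · exact ih x (hh ▸ List.mem_cons_of_mem _ h1)

theorem pvF_splitSp (t : List Char) : pvF (pvSplitSp t) = t ++ [' '] := by
  induction t with
  | nil => simp [pvSplitSp, pvF]
  | cons c t ih =>
    simp only [pvSplitSp]
    split
    · rename_i hc
      subst hc
      simpa [pvF] using ih
    · rcases hh : pvSplitSp t with _ | ⟨h, hs⟩
      · exact absurd hh (pvSplitSp_ne_nil t)
      · rw [hh] at ih
        simp [pvF] at ih ⊢
        simpa using ih

theorem pvEqsp (w : List Char) : ∀ x a b, ' ' ∉ w → ' ' ∉ x →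
    w ++ ' ' :: a = x ++ ' ' :: b → w = x ∧ a = b := by
  induction w with
  | nil =>
    intro x a b _ hx heq
    cases x with
    | nil => simpa using heq
    | cons d x' =>
      simp at heq
      exact absurd (heq.1 ▸ List.mem_cons_self) hx
  | cons c w' ih =>
    intro x a b hw hx heq
    cases x with
    | nil =>
      simp at heq
      exact absurd (heq.1 ▸ List.mem_cons_self) hw
    | cons d x' =>
      simp only [List.cons_append, List.cons.injEq] at heq
      obtain ⟨rfl, heq2⟩ := heq
      obtain ⟨h1, h2⟩ := ih x' a b (fun h => hw (List.mem_cons_of_mem _ h))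
        (fun h => hx (List.mem_cons_of_mem _ h)) heq2
      exact ⟨by rw [h1], h2⟩

theorem pvSkip (x : List Char) : ∀ s1 m q s2, ' ' ∉ x →
    x ++ ' ' :: m = s1 ++ (' ' :: q) ++ s2 → (' ' :: q) ++ s2 <:+ (' ' :: m) := by
  induction x with
  | nil =>
    intro s1 m q s2 _ heq
    cases s1 with
    | nil => exact heq ▸ List.suffix_refl _
    | cons d s1' =>
      simp only [List.nil_append, List.cons_append, List.cons.injEq] at heq
      obtain ⟨rfl, heq2⟩ := heq
      have hsuf : (' ' :: q) ++ s2 <:+ m := by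
        rw [heq2]
        simp
      exact hsuf.trans (List.suffix_cons _ _)
  | cons c x' ih =>
    intro s1 m q s2 hx heq
    cases s1 with
    | nil =>
      simp only [List.nil_append, List.cons_append, List.cons.injEq] at heq
      exact absurd (heq.1 ▸ List.mem_cons_self) hx
    | cons d s1' =>
      simp only [List.cons_append, List.cons.injEq] at heq
      exact ih s1' m q s2 (fun h => hx (List.mem_cons_of_mem _ h)) heq.2

theorem pvU (ts : List (List Char)) (w : List Char) (hts : ∀ x ∈ ts, ' ' ∉ x)
    (hw : ' ' ∉ w) :
    (' ' :: w ++ [' ']) <:+: (' ' :: pvF ts) ↔ w ∈ ts := by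
  induction ts with
  | nil =>
    simp only [pvF, List.map_nil, List.flatten_nil, List.not_mem_nil, iff_false]
    intro h
    have := h.length_le
    simp at this
  | cons x r ih =>
    have hx : ' ' ∉ x := hts x List.mem_cons_self
    have hr : ∀ y ∈ r, ' ' ∉ y := fun y hy => hts y (List.mem_cons_of_mem _ hy)
    have htext : ' ' :: pvF (x :: r) = (' ' :: x) ++ (' ' :: pvF r) := by
      simp [pvF]
    constructor
    · intro h
      obtain ⟨s1, s2, h⟩ := h
      cases s1 with
      | nil =>
        rw [htext] at h
        simp only [List.nil_append, List.cons_append, List.cons.injEq, List.append_assoc] at h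
        have h2 : w ++ ' ' :: s2 = x ++ ' ' :: pvF r := by simpa using h
        exact List.mem_cons.mpr (Or.inl (pvEqsp w x s2 (pvF r) hw hx h2).1)
      | cons c s1' =>
        rw [htext] at h
        simp only [List.cons_append, List.cons.injEq, List.append_assoc] at h
        obtain ⟨rfl, h2⟩ := h
        have h3 : x ++ ' ' :: pvF r = s1' ++ (' ' :: (w ++ [' '])) ++ s2 := by
          simpa using h2.symm
        have hsuf := pvSkip x s1' (pvF r) (w ++ [' ']) s2 hx h3
        obtain ⟨pre, hpre⟩ := hsuf
        have hinfix : (' ' :: w ++ [' ']) <:+: (' ' :: pvF r) :=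
          ⟨pre, s2, by simpa using hpre⟩
        exact List.mem_cons.mpr (Or.inr ((ih hr).mp hinfix))
    · intro hmem
      rcases List.mem_cons.mp hmem with rfl | hmem'
      · exact ⟨[], pvF r, by rw [htext]; simp⟩
      · have hinf := (ih hr).mpr hmem'
        rw [htext]
        exact hinf.trans (List.suffix_append _ _).isInfix

theorem pvB (ts : List (List Char)) (u v : List Char) (hts : ∀ x ∈ ts, ' ' ∉ x)
    (hu : ' ' ∉ u) (hv : ' ' ∉ v) :
    (' ' :: u ++ ' ' :: v ++ [' ']) <:+: (' ' :: pvF ts) ↔ [u, v] <:+: ts := by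
  induction ts with
  | nil =>
    simp only [pvF, List.map_nil, List.flatten_nil]
    constructor
    · intro h
      have := h.length_le
      simp at this
    · intro h
      have := h.length_le
      simp at this
  | cons x r ih =>
    have hx : ' ' ∉ x := hts x List.mem_cons_self
    have hr : ∀ y ∈ r, ' ' ∉ y := fun y hy => hts y (List.mem_cons_of_mem _ hy)
    have htext : ' ' :: pvF (x :: r) = (' ' :: x) ++ (' ' :: pvF r) := by
      simp [pvF]
    constructor
    · intro h
      obtain ⟨s1, s2, h⟩ := h
      cases s1 with
      | nil =>
        rw [htext] at h
        simp only [List.nil_append, List.cons_append, List.cons.injEq, List.append_assoc] at h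
        have h2 : u ++ ' ' :: (v ++ [' '] ++ s2) = x ++ ' ' :: pvF r := by simpa using h
        obtain ⟨rfl, h3⟩ := pvEqsp u x (v ++ [' '] ++ s2) (pvF r) hu hx h2
        -- v ++ [' '] ++ s2 = pvF r : v must be the first token of r
        cases r with
        | nil =>
          exfalso
          simp [pvF] at h3
        | cons y r' =>
          have h4 : v ++ ' ' :: s2 = y ++ ' ' :: pvF r' := by
            simp only [pvF, List.map_cons, List.flatten_cons, List.append_assoc] at h3
            simpa using h3
          have hy : ' ' ∉ y := hr y List.mem_cons_self
          obtain ⟨rfl, _⟩ := pvEqsp v y s2 (pvF r') hv hy h4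
          exact ⟨[], r', by simp⟩
      | cons c s1' =>
        rw [htext] at h
        simp only [List.cons_append, List.cons.injEq, List.append_assoc] at h
        obtain ⟨rfl, h2⟩ := h
        have h3 : x ++ ' ' :: pvF r = s1' ++ (' ' :: (u ++ ' ' :: v ++ [' '])) ++ s2 := by
          simpa using h2.symm
        have hsuf := pvSkip x s1' (pvF r) (u ++ ' ' :: v ++ [' ']) s2 hx h3
        obtain ⟨pre, hpre⟩ := hsuf
        have hinfix : (' ' :: u ++ ' ' :: v ++ [' ']) <:+: (' ' :: pvF r) :=
          ⟨pre, s2, by simpa using hpre⟩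
        exact List.infix_cons_iff.mpr (Or.inr ((ih hr).mp hinfix))
    · intro hmem
      rcases List.infix_cons_iff.mp hmem with hpre | hinf
      · obtain ⟨rfl, hpre2⟩ := List.cons_prefix_cons.mp hpre
        obtain ⟨r', rfl⟩ : ∃ r', r = v :: r' := by
          cases r with
          | nil => simp at hpre2
          | cons y r' =>
            obtain ⟨rfl, _⟩ := List.cons_prefix_cons.mp hpre2
            exact ⟨r', rfl⟩
        refine ⟨[], pvF r', ?_⟩
        simp [pvF]
      · have h := (ih hr).mpr hinf
        rw [htext]
        exact h.trans (List.suffix_append _ _).isInfix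

theorem pvZipAdj (ts : List (List Char)) (p : List Char × List Char) :
    p ∈ List.zip ts ts.tail ↔ [p.1, p.2] <:+: ts := by
  induction ts with
  | nil => simp
  | cons x r ih =>
    cases r with
    | nil =>
      simp only [List.tail_cons, List.zip_nil_right, List.not_mem_nil, false_iff]
      intro h
      have := h.length_le
      simp at this
    | cons y r' =>
      simp only [List.tail_cons, List.zip_cons_cons, List.mem_cons]
      rw [List.infix_cons_iff]
      constructor
      · rintro (rfl | hm)
        · exact Or.inl (by simp)
        · exact Or.inr ((ih).mp hm)
      · rintro (hp | hi)
        · obtain ⟨h1, hp2⟩ := List.cons_prefix_cons.mp hp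
          obtain ⟨h2, _⟩ := List.cons_prefix_cons.mp hp2
          left
          cases p
          simp_all
        · exact Or.inr ((ih).mpr hi)

theorem pvContF (x : Int) (l : List (List Char)) :
    ∀ s0 : PySem.Set Int,
      ((l.foldl (fun s g => match pvKw.get? g with | some b => s.add b | none => s) s0).contains x = true
        ↔ s0.contains x = true ∨ ∃ g ∈ l, pvKw.get? g = some x) := by
  induction l with
  | nil => simp
  | cons g l' ih =>
    intro s0
    rw [List.foldl_cons]
    rcases hg : pvKw.get? g with _ | b
    · simp only [ih]
      constructor
      · rintro (h | h)
        · exact Or.inl h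
        · exact Or.inr (by simpa using Or.inr h)
      · rintro (h | h)
        · exact Or.inl h
        · rcases (by simpa using h : pvKw.get? g = some x ∨ ∃ a ∈ l', pvKw.get? a = some x) with h2 | h2
          · rw [hg] at h2; cases h2
          · exact Or.inr h2
    · simp only [ih]
      rw [PySem.Set.contains_iff, PySem.Set.mem_add, ← PySem.Set.contains_iff]
      constructor
      · rintro ((h | rfl) | h)
        · exact Or.inl h
        · exact Or.inr (by simpa using Or.inl hg)
        · exact Or.inr (by simpa using Or.inr h)
      · rintro (h | h)
        · exact Or.inl (Or.inl h)
        · rcases (by simpa using h : pvKw.get? g = some x ∨ ∃ a ∈ l', pvKw.get? a = some x) with h2 | h2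
          · rw [hg] at h2
            exact Or.inl (Or.inr (by injection h2 with h3; exact h3.symm))
          · exact Or.inr h2

theorem pvNotMemOfContainsFalse {α : Type} [BEq α] [LawfulBEq α] (s : PySem.Set α) (x : α)
    (h : s.contains x = false) : x ∉ s :=
  fun hm => by simp at h; exact h hm

theorem pvDedupAux (l : List String) : ∀ (acc : List String) (seen : PySem.Set (List Char)),
    (∀ s ∈ l, seen.contains (PySem.Chars.lower (PySem.Chars.strip s.toList)) = false) →
    ((l.map (fun s => PySem.Chars.lower (PySem.Chars.strip s.toList))).Nodup) →
    (l.foldl pvMergeStep (acc, seen)).1 = acc ++ l := by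
  induction l with
  | nil => intro acc seen _ _; simp
  | cons s l' ih =>
    intro acc seen hfresh hnd
    rw [List.foldl_cons]
    have hc : seen.contains (PySem.Chars.lower (PySem.Chars.strip s.toList)) = false :=
      hfresh s List.mem_cons_self
    have hstep : pvMergeStep (acc, seen) s
        = (acc ++ [s], seen.add (PySem.Chars.lower (PySem.Chars.strip s.toList))) := by
      simp [pvMergeStep, pvNotMemOfContainsFalse _ _ hc]
    rw [hstep]
    simp only [List.map_cons, List.nodup_cons] at hnd
    have hfresh' : ∀ s' ∈ l',
        ((seen.add (PySem.Chars.lower (PySem.Chars.strip s.toList))).contains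
          (PySem.Chars.lower (PySem.Chars.strip s'.toList))) = false := by
      intro s' hs'
      rw [← Bool.not_eq_true, PySem.Set.contains_iff, PySem.Set.mem_add]
      rintro (hmem | heq)
      · exact pvNotMemOfContainsFalse _ _ (hfresh s' (List.mem_cons_of_mem _ hs')) hmem
      · exact hnd.1 (heq ▸ List.mem_map.mpr ⟨s', hs', rfl⟩)
    rw [ih (acc ++ [s]) _ hfresh' hnd.2]
    simp

theorem pvDedupNoop (l : List String)
    (h : (l.map (fun s => PySem.Chars.lower (PySem.Chars.strip s.toList))).Nodup) :
    (l.foldl pvMergeStep (([] : List String), (PySem.Set.empty : PySem.Set (List Char)))).1 = l := by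
  have := pvDedupAux l [] PySem.Set.empty (fun s _ => rfl) h
  simpa using this

theorem pvSelAux (ps : List (Bool × List String)) :
    ∀ acc, List.Sublist (ps.foldl (fun a e => if e.1 then a ++ e.2 else a) acc)
      (acc ++ (ps.map Prod.snd).flatten) := by
  induction ps with
  | nil => intro acc; simp
  | cons e ps' ih =>
    intro acc
    rw [List.foldl_cons]
    rcases e with ⟨b, g⟩
    cases b
    · simp only [Bool.false_eq_true, if_false]
      refine (ih acc).trans ?_
      simp only [List.map_cons, List.flatten_cons]
      exact List.Sublist.append_left (List.sublist_append_right _ _) acc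
    · simp only [if_true]
      refine (ih (acc ++ g)).trans ?_
      simp [List.append_assoc]

theorem pvSelSublist (ps : List (Bool × List String)) :
    List.Sublist (pvSel ps) ((ps.map Prod.snd).flatten) := by
  simpa using pvSelAux ps []

theorem pvKeyU (t w : List Char) (hw : ' ' ∉ w) :
    (PySem.Chars.isIn (' ' :: w ++ [' ']) (' ' :: t ++ [' ']) = true) ↔ w ∈ pvGrams (pvSplitSp t) := by
  rw [PySem.Chars.isIn_iff_infix]
  have htext : ' ' :: t ++ [' '] = ' ' :: pvF (pvSplitSp t) := by
    rw [pvF_splitSp]; rfl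
  rw [htext, pvU (pvSplitSp t) w (pvSplitSp_sf t) hw]
  unfold pvGrams
  rw [List.mem_append]
  constructor
  · exact Or.inl
  · rintro (h | h)
    · exact h
    · exfalso
      obtain ⟨p, _, rfl⟩ := List.mem_map.mp h
      exact hw (by simp)

theorem pvKeyB (t u v : List Char) (hu : ' ' ∉ u) (hv : ' ' ∉ v) :
    (PySem.Chars.isIn (' ' :: u ++ ' ' :: v ++ [' ']) (' ' :: t ++ [' ']) = true)
      ↔ (u ++ ' ' :: v) ∈ pvGrams (pvSplitSp t) := by
  rw [PySem.Chars.isIn_iff_infix]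
  have htext : ' ' :: t ++ [' '] = ' ' :: pvF (pvSplitSp t) := by
    rw [pvF_splitSp]; rfl
  rw [htext, pvB (pvSplitSp t) u v (pvSplitSp_sf t) hu hv]
  unfold pvGrams
  rw [List.mem_append]
  constructor
  · intro h
    right
    rw [← pvZipAdj (pvSplitSp t) (u, v)] at h
    exact List.mem_map.mpr ⟨(u, v), h, rfl⟩
  · rintro (h | h)
    · exact absurd (by simp : ' ' ∈ u ++ ' ' :: v) (pvSplitSp_sf t _ h)
    · obtain ⟨⟨a, b⟩, hm, heq⟩ := List.mem_map.mp h
      have ha : ' ' ∉ a := pvSplitSp_sf t a (List.of_mem_zip hm).1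
      obtain ⟨rfl, rfl⟩ := pvEqsp u a v b hu ha heq.symm
      exact (pvZipAdj (pvSplitSp t) (u, v)).mp hm

theorem pvGoodU (w : String) (hw : ' ' ∉ w.toList) : pvGood w :=
  fun t => pvKeyU t w.toList hw

theorem pvGoodLR : pvGood "living room" := by
  intro t
  have h := pvKeyB t "living".toList "room".toList (by decide) (by decide)
  simpa using h

theorem pvFlagGen (t : List Char) (i : Int) (ws : List String)
    (hgood : ∀ w ∈ ws, pvGood w)
    (hdict : ∀ g, pvKw.get? g = some i ↔ g ∈ ws.map String.toList) :
    (pvHits t).contains i = pvHasAny (' ' :: t ++ [' ']) ws := by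
  rw [Bool.eq_iff_iff]
  unfold pvHits pvHasAny
  rw [pvContF]
  simp only [List.any_eq_true]
  constructor
  · rintro (habs | ⟨g, hg, hget⟩)
    · simp [PySem.Set.empty] at habs
    · obtain ⟨w, hw, rfl⟩ := List.mem_map.mp ((hdict g).mp hget)
      exact ⟨w, hw, (hgood w hw t).mpr hg⟩
  · rintro ⟨w, hw, hin⟩
    exact Or.inr ⟨w.toList, (hgood w hw t).mp hin, (hdict _).mpr (List.mem_map_of_mem hw)⟩

theorem pvKwNodup : pvKw.keys.Nodup := by decide

theorem pvDict0 : ∀ g, pvKw.get? g = some 0 ↔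
    g ∈ (["travel", "flight", "airport", "hotel", "commute", "train"] : List String).map String.toList := by
  intro g
  rw [PySem.Dict.get?_eq_some_iff_mem_items pvKw g 0 pvKwNodup]
  simp [pvKw]

theorem pvDict1 : ∀ g, pvKw.get? g = some 1 ↔
    g ∈ (["home", "remote", "kitchen", "living room", "family", "personal"] : List String).map String.toList := by
  intro g
  rw [PySem.Dict.get?_eq_some_iff_mem_items pvKw g 1 pvKwNodup]
  simp [pvKw]

theorem pvDict2 : ∀ g, pvKw.get? g = some 2 ↔
    g ∈ (["code", "developer", "software", "api", "server", "cloud", "database"] : List String).map String.toList := by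
  intro g
  rw [PySem.Dict.get?_eq_some_iff_mem_items pvKw g 2 pvKwNodup]
  simp [pvKw]

theorem pvDict3 : ∀ g, pvKw.get? g = some 3 ↔
    g ∈ (["design", "brand", "creative", "photo", "video", "editing"] : List String).map String.toList := by
  intro g
  rw [PySem.Dict.get?_eq_some_iff_mem_items pvKw g 3 pvKwNodup]
  simp [pvKw]

theorem pvDict4 : ∀ g, pvKw.get? g = some 4 ↔
    g ∈ (["finance", "budget", "cost", "price", "revenue", "adsense"] : List String).map String.toList := by
  intro g
  rw [PySem.Dict.get?_eq_some_iff_mem_items pvKw g 4 pvKwNodup]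
  simp [pvKw]

theorem pvDict5 : ∀ g, pvKw.get? g = some 5 ↔
    g ∈ (["health", "medical", "wellness", "sleep", "fitness"] : List String).map String.toList := by
  intro g
  rw [PySem.Dict.get?_eq_some_iff_mem_items pvKw g 5 pvKwNodup]
  simp [pvKw]

theorem pvDict6 : ∀ g, pvKw.get? g = some 6 ↔
    g ∈ (["education", "learn", "course", "student", "training"] : List String).map String.toList := by
  intro g
  rw [PySem.Dict.get?_eq_some_iff_mem_items pvKw g 6 pvKwNodup]
  simp [pvKw]

theorem pvDict7 : ∀ g, pvKw.get? g = some 7 ↔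
    g ∈ (["retail", "store", "customer", "sales", "shop", "ecommerce"] : List String).map String.toList := by
  intro g
  rw [PySem.Dict.get?_eq_some_iff_mem_items pvKw g 7 pvKwNodup]
  simp [pvKw]


theorem pvFlag0 (t : List Char) : (pvHits t).contains 0 =
    pvHasAny (' ' :: t ++ [' ']) ["travel", "flight", "airport", "hotel", "commute", "train"] := by
  refine pvFlagGen t 0 _ ?_ pvDict0
  intro w hw
  fin_cases hw <;> first
    | exact pvGoodLR
    | exact pvGoodU _ (by decide)

theorem pvFlag1 (t : List Char) : (pvHits t).contains 1 =
    pvHasAny (' ' :: t ++ [' ']) ["home", "remote", "kitchen", "living room", "family", "personal"] := by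
  refine pvFlagGen t 1 _ ?_ pvDict1
  intro w hw
  fin_cases hw <;> first
    | exact pvGoodLR
    | exact pvGoodU _ (by decide)

theorem pvFlag2 (t : List Char) : (pvHits t).contains 2 =
    pvHasAny (' ' :: t ++ [' ']) ["code", "developer", "software", "api", "server", "cloud", "database"] := by
  refine pvFlagGen t 2 _ ?_ pvDict2
  intro w hw
  fin_cases hw <;> first
    | exact pvGoodLR
    | exact pvGoodU _ (by decide)

theorem pvFlag3 (t : List Char) : (pvHits t).contains 3 =
    pvHasAny (' ' :: t ++ [' ']) ["design", "brand", "creative", "photo", "video", "editing"] := by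
  refine pvFlagGen t 3 _ ?_ pvDict3
  intro w hw
  fin_cases hw <;> first
    | exact pvGoodLR
    | exact pvGoodU _ (by decide)

theorem pvFlag4 (t : List Char) : (pvHits t).contains 4 =
    pvHasAny (' ' :: t ++ [' ']) ["finance", "budget", "cost", "price", "revenue", "adsense"] := by
  refine pvFlagGen t 4 _ ?_ pvDict4
  intro w hw
  fin_cases hw <;> first
    | exact pvGoodLR
    | exact pvGoodU _ (by decide)

theorem pvFlag5 (t : List Char) : (pvHits t).contains 5 =
    pvHasAny (' ' :: t ++ [' ']) ["health", "medical", "wellness", "sleep", "fitness"] := by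
  refine pvFlagGen t 5 _ ?_ pvDict5
  intro w hw
  fin_cases hw <;> first
    | exact pvGoodLR
    | exact pvGoodU _ (by decide)

theorem pvFlag6 (t : List Char) : (pvHits t).contains 6 =
    pvHasAny (' ' :: t ++ [' ']) ["education", "learn", "course", "student", "training"] := by
  refine pvFlagGen t 6 _ ?_ pvDict6
  intro w hw
  fin_cases hw <;> first
    | exact pvGoodLR
    | exact pvGoodU _ (by decide)

theorem pvFlag7 (t : List Char) : (pvHits t).contains 7 =
    pvHasAny (' ' :: t ++ [' ']) ["retail", "store", "customer", "sales", "shop", "ecommerce"] := by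
  refine pvFlagGen t 7 _ ?_ pvDict7
  intro w hw
  fin_cases hw <;> first
    | exact pvGoodLR
    | exact pvGoodU _ (by decide)


-- A's chain of eight conditional bucket appends, flattened into pvSel
theorem pv_flatten (ps : List (Bool × List String)) :
    ∀ (acc : List (List String)),
      (ps.foldl (fun a e => if e.1 then a ++ [e.2] else a) acc).flatten
        = ps.foldl (fun a e => if e.1 then a ++ e.2 else a) acc.flatten := by
  induction ps with
  | nil => intro acc; rfl
  | cons e t ih =>
    intro acc
    simp only [List.foldl_cons]
    rcases e with ⟨b, g⟩
    cases b <;> simp [ih]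

theorem pv_gen (b1 b2 b3 b4 b5 b6 b7 b8 : Bool) :
    (((pvPairs b1 b2 b3 b4 b5 b6 b7 b8).foldl
        (fun a (e : Bool × List String) => if e.1 then a ++ [e.2] else a)
        ([] : List (List String))).foldl
        (fun st group => group.foldl pvMergeStep st)
        (([] : List String), (PySem.Set.empty : PySem.Set (List Char)))).1
      = ((pvSel (pvPairs b1 b2 b3 b4 b5 b6 b7 b8)).foldl pvMergeStep
        (([] : List String), (PySem.Set.empty : PySem.Set (List Char)))).1 := by
  rw [← List.foldl_flatten, pv_flatten]
  rfl

theorem pvPairs_snd (b1 b2 b3 b4 b5 b6 b7 b8 : Bool) :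
    (((pvPairs b1 b2 b3 b4 b5 b6 b7 b8).map Prod.snd).flatten) = pvAllScenes := by
  simp [pvPairs, pvAllScenes]

theorem pvAllScenesKeysNodup :
    (pvAllScenes.map (fun s => PySem.Chars.lower (PySem.Chars.strip s.toList))).Nodup := by
  decide

-- ===== VERDICT (by name: the statement is the Claim_ definition above) =====
theorem context_scene_pool_py_spec : Claim_equal_context_scene_pool_py := by
  intro context _
  show context_scene_pool_py context = context_scene_pool_py_alt context
  have hA : context_scene_pool_py context
      = ((pvSel (pvPairs
          (pvHasAny (' ' :: PySem.Chars.lower context.toList ++ [' ']) ["travel", "flight", "airport", "hotel", "commute", "train"])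
      (pvHasAny (' ' :: PySem.Chars.lower context.toList ++ [' ']) ["home", "remote", "kitchen", "living room", "family", "personal"])
      (pvHasAny (' ' :: PySem.Chars.lower context.toList ++ [' ']) ["code", "developer", "software", "api", "server", "cloud", "database"])
      (pvHasAny (' ' :: PySem.Chars.lower context.toList ++ [' ']) ["design", "brand", "creative", "photo", "video", "editing"])
      (pvHasAny (' ' :: PySem.Chars.lower context.toList ++ [' ']) ["finance", "budget", "cost", "price", "revenue", "adsense"])
      (pvHasAny (' ' :: PySem.Chars.lower context.toList ++ [' ']) ["health", "medical", "wellness", "sleep", "fitness"])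
      (pvHasAny (' ' :: PySem.Chars.lower context.toList ++ [' ']) ["education", "learn", "course", "student", "training"])
      (pvHasAny (' ' :: PySem.Chars.lower context.toList ++ [' ']) ["retail", "store", "customer", "sales", "shop", "ecommerce"]))).foldl pvMergeStep
          (([] : List String), (PySem.Set.empty : PySem.Set (List Char)))).1 :=
    pv_gen (pvHasAny (' ' :: PySem.Chars.lower context.toList ++ [' ']) ["travel", "flight", "airport", "hotel", "commute", "train"]) (pvHasAny (' ' :: PySem.Chars.lower context.toList ++ [' ']) ["home", "remote", "kitchen", "living room", "family", "personal"]) (pvHasAny (' ' :: PySem.Chars.lower context.toList ++ [' ']) ["code", "developer", "software", "api", "server", "cloud", "database"]) (pvHasAny (' ' :: PySem.Chars.lower context.toList ++ [' ']) ["design", "brand", "creative", "photo", "video", "editing"]) (pvHasAny (' ' :: PySem.Chars.lower context.toList ++ [' ']) ["finance", "budget", "cost", "price", "revenue", "adsense"]) (pvHasAny (' ' :: PySem.Chars.lower context.toList ++ [' ']) ["health", "medical", "wellness", "sleep", "fitness"]) (pvHasAny (' ' :: PySem.Chars.lower context.toList ++ [' ']) ["education", "learn", "course", "student", "training"]) (pvHasAny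 (' ' :: PySem.Chars.lower context.toList ++ [' ']) ["retail", "store", "customer", "sales", "shop", "ecommerce"])
  have hsub := (pvSelSublist (pvPairs
      (pvHasAny (' ' :: PySem.Chars.lower context.toList ++ [' ']) ["travel", "flight", "airport", "hotel", "commute", "train"])
      (pvHasAny (' ' :: PySem.Chars.lower context.toList ++ [' ']) ["home", "remote", "kitchen", "living room", "family", "personal"])
      (pvHasAny (' ' :: PySem.Chars.lower context.toList ++ [' ']) ["code", "developer", "software", "api", "server", "cloud", "database"])
      (pvHasAny (' ' :: PySem.Chars.lower context.toList ++ [' ']) ["design", "brand", "creative", "photo", "video", "editing"])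
      (pvHasAny (' ' :: PySem.Chars.lower context.toList ++ [' ']) ["finance", "budget", "cost", "price", "revenue", "adsense"])
      (pvHasAny (' ' :: PySem.Chars.lower context.toList ++ [' ']) ["health", "medical", "wellness", "sleep", "fitness"])
      (pvHasAny (' ' :: PySem.Chars.lower context.toList ++ [' ']) ["education", "learn", "course", "student", "training"])
      (pvHasAny (' ' :: PySem.Chars.lower context.toList ++ [' ']) ["retail", "store", "customer", "sales", "shop", "ecommerce"]))).map
      (fun s => PySem.Chars.lower (PySem.Chars.strip s.toList))
  rw [pvPairs_snd] at hsub
  have hnd := pvAllScenesKeysNodup.sublist hsub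
  rw [hA, pvDedupNoop _ hnd]
  rw [← pvFlag0 (PySem.Chars.lower context.toList), ← pvFlag1 (PySem.Chars.lower context.toList),
      ← pvFlag2 (PySem.Chars.lower context.toList), ← pvFlag3 (PySem.Chars.lower context.toList),
      ← pvFlag4 (PySem.Chars.lower context.toList), ← pvFlag5 (PySem.Chars.lower context.toList),
      ← pvFlag6 (PySem.Chars.lower context.toList), ← pvFlag7 (PySem.Chars.lower context.toList)]
  rfl
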